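-- pv_equiv track=rewrite | github.com/ywatanabe1989/scitex-python | mcp_servers/scitex_io_translator/translators/io_translator.py | _consolidate_imports
-- ===== SOURCE A (Python) =====
-- def _consolidate_imports(code: str) -> str:
--     """Consolidate multiple stx imports into one."""
--     lines = code.split('\n')
--     new_lines = []
--     has_stx_import = False
--
--     for line in lines:
--         if 'import scitex as stx' in line and not has_stx_import:
--             new_lines.append(line)
--             has_stx_import = True
--         elif 'import scitex as stx' in line and has_stx_import:
--             # Skip duplicate imports
--             continue
--         else:
--             new_lines.append(line)
--
--     return '\n'.join(new_lines)
-- ===== SOURCE B (Python) =====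
-- def _consolidate_imports(code: str) -> str:
--     """Consolidate multiple stx imports into one."""
--     marker = 'import scitex as stx'
--     lines = code.split('\n')
--     for i, line in enumerate(lines):
--         if marker in line:
--             kept_tail = [l for l in lines[i + 1:] if marker not in l]
--             return '\n'.join(lines[:i + 1] + kept_tail)
--     return '\n'.join(lines)
-- ===== Notes on version B (the rewrite author's own statement) =====
-- stated objective: alternative
-- what changed: B scans only until the first line containing the marker, early-returns the untouched prefix slice verbatim plus the filtered tail, and never carries a flag; if no marker line exists the whole list is joined back unchanged.
import Mathlib
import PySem

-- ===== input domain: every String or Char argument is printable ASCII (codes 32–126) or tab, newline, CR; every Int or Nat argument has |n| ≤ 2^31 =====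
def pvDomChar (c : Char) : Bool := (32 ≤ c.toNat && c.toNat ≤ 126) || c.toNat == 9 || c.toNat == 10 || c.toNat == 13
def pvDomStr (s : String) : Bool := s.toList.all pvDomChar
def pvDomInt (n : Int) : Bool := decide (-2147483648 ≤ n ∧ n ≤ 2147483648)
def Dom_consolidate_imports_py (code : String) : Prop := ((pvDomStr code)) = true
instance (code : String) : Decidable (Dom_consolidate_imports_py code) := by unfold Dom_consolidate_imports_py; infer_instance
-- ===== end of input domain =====

-- B scans only until the first marker line, early-returns the untouched prefix slice plus the filtered tail (no flag); same cost as A, alternative structure.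


-- ===== PORT A =====
-- 'import scitex as stx' in line (shared substring test, used by both ports)
def stxIn (line : String) : Bool := PySem.Str.isIn "import scitex as stx" line

-- A's for-loop over lines, carrying the has_stx_import flag; new_lines built in order
def loopA (ls : List String) (has : Bool) : List String :=
  match ls with
  | [] => []
  | l :: rest =>
    if stxIn l && !has then l :: loopA rest true
    else if stxIn l && has then loopA rest has
    else l :: loopA rest has

def consolidate_imports_py (code : String) : String :=
  let lines := (PySem.Str.split? code "\n").getD []
  PySem.Str.join "\n" (loopA lines false)

-- ===== PORT B =====
-- Source B's 'for i, line in enumerate(lines): if marker in line: return …' scan;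
-- falling off the loop returns the whole list
def loopB (lines : List String) (ps : List (Int × String)) : List String :=
  match ps with
  | [] => lines
  | (i, l) :: rest =>
    if stxIn l then
      PySem.List.slice lines none (some (i + 1)) ++
        (PySem.List.slice lines (some (i + 1)) none).filter (fun x => !stxIn x)
    else loopB lines rest

def consolidate_imports_py_alt (code : String) : String :=
  let lines := (PySem.Str.split? code "\n").getD []
  PySem.Str.join "\n" (loopB lines (PySem.List.enumerate lines 0))

-- ===== PRECONDITION & SPEC =====
def Spec_consolidate_imports_py (code : String) (out : String) : Prop := out = consolidate_imports_py_alt code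
instance (code : String) (out : String) : Decidable (Spec_consolidate_imports_py code out) := by unfold Spec_consolidate_imports_py; infer_instance

-- ===== CLAIM (what is proved, stated in full; the proofs are below) =====
def Claim_equal_consolidate_imports_py : Prop := ∀ (code : String), Dom_consolidate_imports_py code → Spec_consolidate_imports_py code (consolidate_imports_py code)

-- ===== LEMMAS AND PROOFS =====

-- once the flag is set, A's loop is a plain filter on the substring test
theorem loopA_true (ls : List String) :
    loopA ls true = ls.filter (fun l => !stxIn l) := by
  induction ls with
  | nil => rfl
  | cons l rest ih =>
    by_cases h : stxIn l = true <;> simp [loopA, h, ih]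

-- main invariant: B's early-return scan over the suffix from position k
-- equals the kept prefix plus A's flag-unset loop over that suffix
theorem loopB_eq (lines : List String) (ls : List String) (k : Nat)
    (hdrop : lines.drop k = ls) :
    loopB lines (PySem.List.enumerate ls (k : Int))
      = lines.take k ++ loopA ls false := by
  induction ls generalizing k with
  | nil =>
    have hk : lines.length <= k := by
      by_contra h
      exact absurd hdrop (by simp [List.drop_eq_nil_iff]; omega)
    simp [loopB, loopA, PySem.List.enumerate, List.take_of_length_le hk]
  | cons l rest ih =>
    have hget : lines[k]? = some l := by
      have h0 : (List.drop k lines)[0]? = lines[k + 0]? := List.getElem?_drop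
      rw [hdrop] at h0
      simpa using h0.symm
    have hdrop1 : lines.drop (k + 1) = rest := by
      have h1 : (lines.drop k).drop 1 = rest := by rw [hdrop]; rfl
      rwa [List.drop_drop] at h1
    have htake : lines.take (k + 1) = lines.take k ++ [l] := by
      rw [List.take_add_one, hget]; rfl
    have hc : ((k : Int) + 1) = ((k + 1 : Nat) : Int) := by push_cast; ring
    by_cases h : stxIn l = true
    · simp only [PySem.List.enumerate_cons, loopB, h, if_true, hc,
        PySem.List.slice_to_natCast, PySem.List.slice_from_natCast,
        hdrop1, htake]
      simp [loopA, h, loopA_true]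
    · simp only [PySem.List.enumerate_cons, loopB, h, hc]
      rw [ih (k + 1) hdrop1, htake]
      simp [loopA, h]

-- ===== VERDICT (by name: the statement is the Claim_ definition above) =====
theorem consolidate_imports_py_spec : Claim_equal_consolidate_imports_py := by
  intro code _
  simp only [Spec_consolidate_imports_py, consolidate_imports_py, consolidate_imports_py_alt]
  have h := loopB_eq ((PySem.Str.split? code "\n").getD []) _ 0 rfl
  simp only [Nat.cast_zero, List.drop_zero, List.take_zero, List.nil_append] at h
  rw [h]
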